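-- pv_equiv track=rewrite | github.com/elaplas/data_structure_and_algos | puzzels/colorful_number/colorful_number.py | is_colorful_num_helper
-- ===== SOURCE A (Python) =====
-- def is_colorful_num_helper(number, map, combinations):
--
--     if number == 0:
--         combinations.append(0)
--         return True
--
--     res = is_colorful_num_helper(number//10, map, combinations)
--
--     if not res:
--         return False
--
--     new_combinations = []
--     # Append "0" for adding the reminder itself in to the combinations list for the next function call
--     new_combinations.append(0)
--     reminder = number % 10
--
--     for num in combinations:
--         new_combination = (num*10) + reminder
--
--         cur_num = new_combination
--         product = 1
--         while cur_num:
--             product *= (cur_num%10)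
--             cur_num = cur_num //10
--
--         if product in map:
--             return False
--         else:
--             map[product] = 1
--
--         new_combinations.append(new_combination)
--
--     # Copy new combinations in order not to overwrite the reference list "combinations" by simply using the "equal sign"
--     combinations.clear()
--     for el in new_combinations:
--         combinations.append(el)
--
--     return True
-- ===== SOURCE B (Python) =====
-- def _digit_product(v):
--     p = 1
--     while v > 0:
--         p *= v % 10
--         v //= 10
--     return p
--
--
-- def is_colorful_num_helper(number, map, combinations):
--     # Iterative digit-by-digit pass; digit products are maintained incrementally
--     # (product of v*10+r is product(v)*r) instead of being recomputed per substring.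
--     # Return-value equivalent to A; mutates map/combinations like A on success.
--     if number == 0:
--         combinations.append(0)
--         return True
--     digits = []
--     n = number
--     while n > 0:
--         digits.append(n % 10)
--         n //= 10
--     digits.reverse()
--     combos = [(c, _digit_product(c)) for c in combinations]
--     combos.append((0, 1))
--     for r in digits:
--         new_combos = [(0, 1)]
--         for v, p in combos:
--             nv = v * 10 + r
--             np = 1 if nv == 0 else p * r
--             if np in map:
--                 return False
--             map[np] = 1
--             new_combos.append((nv, np))
--         combos = new_combos
--     combinations[:] = [v for v, _ in combos]
--     return True
-- ===== Notes on version B (the rewrite author's own statement) =====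
-- stated objective: alternative
-- what changed: Replaces A's recursion that recomputes every combination's digit product from scratch with an inner while loop by a single iterative digit pass that carries each combination's running digit product and updates it as product*digit.
import Mathlib
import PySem

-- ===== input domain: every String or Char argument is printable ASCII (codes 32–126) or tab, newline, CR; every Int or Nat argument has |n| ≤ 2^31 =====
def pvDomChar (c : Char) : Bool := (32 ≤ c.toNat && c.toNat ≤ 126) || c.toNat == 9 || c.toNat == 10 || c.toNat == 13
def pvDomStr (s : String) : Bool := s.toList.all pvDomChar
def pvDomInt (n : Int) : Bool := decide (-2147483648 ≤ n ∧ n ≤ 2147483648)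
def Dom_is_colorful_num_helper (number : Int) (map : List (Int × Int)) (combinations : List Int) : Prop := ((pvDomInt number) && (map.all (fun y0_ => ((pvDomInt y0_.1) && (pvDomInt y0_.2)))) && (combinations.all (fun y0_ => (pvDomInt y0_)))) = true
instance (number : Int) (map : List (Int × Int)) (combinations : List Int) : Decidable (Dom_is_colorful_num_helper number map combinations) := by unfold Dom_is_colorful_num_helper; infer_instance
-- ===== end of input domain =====

-- B replaces A's recursion (which recomputes each combination's digit product from scratch with
-- an inner while loop) by one iterative digit pass that carries each combination's digit product
-- along incrementally.  Equivalence is about the RETURN VALUE; both Pythons mutate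
-- `map`/`combinations` (identically on success), and on failure the leftover state may differ.

-- ===== PORT A =====
-- termination measure fact for the //10 loops below (cited by their decreasing_by)
theorem pvDiv10_toNat_lt (v : Int) (h : 0 < v) :
    (PySem.Int.floordiv v 10).toNat < v.toNat := by
  rw [PySem.Int.floordiv_eq_ediv_of_pos (by omega : (0:Int) < 10)]
  omega

-- the inner `while cur_num:` product loop; Python diverges for negative cur_num (excluded by Pre_)
def pvDigitProdA (cur_num product : Int) : Int :=
  if 0 < cur_num then
    pvDigitProdA (PySem.Int.floordiv cur_num 10) (product * PySem.Int.mod cur_num 10)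
  else product
termination_by cur_num.toNat
decreasing_by exact pvDiv10_toNat_lt _ (by assumption)

-- the `for num in combinations:` loop of one recursion level (acc = new_combinations)
def pvLevelA (r : Int) : List Int → PySem.Dict Int Int → List Int →
    (Bool × PySem.Dict Int Int × List Int)
  | [], m, acc => (true, m, acc)
  | num :: rest, m, acc =>
    let nc := num * 10 + r
    let product := pvDigitProdA nc 1
    if m.contains product then (false, m, acc)
    else pvLevelA r rest (m.insert product 1) (acc ++ [nc])

-- the recursive helper itself, threading (result, map, combinations)
def pvGoA (number : Int) (m : PySem.Dict Int Int) (combs : List Int) :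
    Bool × PySem.Dict Int Int × List Int :=
  if number = 0 then (true, m, combs ++ [0])
  else if number < 0 then (false, m, combs)  -- Python recurses forever here; excluded by Pre_
  else
    match pvGoA (PySem.Int.floordiv number 10) m combs with
    | (false, m1, c1) => (false, m1, c1)
    | (true, m1, c1) => pvLevelA (PySem.Int.mod number 10) c1 m1 [0]
termination_by number.toNat
decreasing_by exact pvDiv10_toNat_lt _ (by omega)

def is_colorful_num_helper (number : Int) (map : List (Int × Int)) (combinations : List Int) : Bool :=
  (pvGoA number (PySem.Dict.ofList map) combinations).1

-- ===== PORT B =====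
-- Source B's _digit_product (`while v > 0`, so it terminates on every input)
def pvDigitProdB (v p : Int) : Int :=
  if 0 < v then pvDigitProdB (PySem.Int.floordiv v 10) (p * PySem.Int.mod v 10) else p
termination_by v.toNat
decreasing_by exact pvDiv10_toNat_lt _ (by assumption)

-- the `while n > 0: digits.append(n % 10); n //= 10` loop (low digit first)
def pvLowDigits (n : Int) : List Int :=
  if 0 < n then PySem.Int.mod n 10 :: pvLowDigits (PySem.Int.floordiv n 10) else []
termination_by n.toNat
decreasing_by exact pvDiv10_toNat_lt _ (by assumption)

-- `for v, p in combos:` of one digit r; acc = new_combos; none = `return False`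
def pvLevelB (r : Int) : List (Int × Int) → PySem.Dict Int Int → List (Int × Int) →
    Option (PySem.Dict Int Int × List (Int × Int))
  | [], m, acc => some (m, acc)
  | (v, p) :: rest, m, acc =>
    let nv := v * 10 + r
    let np := if nv = 0 then 1 else p * r
    if m.contains np then none
    else pvLevelB r rest (m.insert np 1) (acc ++ [(nv, np)])

-- `for r in digits:` over the digit list
def pvGoB : List Int → PySem.Dict Int Int → List (Int × Int) →
    Option (PySem.Dict Int Int × List (Int × Int))
  | [], m, ps => some (m, ps)
  | r :: rest, m, ps =>
    match pvLevelB r ps m [(0, 1)] with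
    | none => none
    | some (m', ps') => pvGoB rest m' ps'

def is_colorful_num_helper_alt (number : Int) (map : List (Int × Int)) (combinations : List Int) : Bool :=
  if number = 0 then true
  else
    match pvGoB (pvLowDigits number).reverse (PySem.Dict.ofList map)
        ((combinations.map (fun c => (c, pvDigitProdB c 1))) ++ [(0, 1)]) with
    | none => false
    | some _ => true

-- ===== PRECONDITION & SPEC =====
-- helpers for Pre_ (digit product and leading digit of a nonnegative value, in closed form)
def pvPreDigitProd (n : Nat) : Int :=
  if h : n = 0 then 1 else pvPreDigitProd (n / 10) * ((n % 10 : Nat) : Int)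
decreasing_by exact Nat.div_lt_self (Nat.pos_of_ne_zero h) (by norm_num)

def pvPreMsd (n : Nat) : Nat :=
  if n < 10 then n else pvPreMsd (n / 10)
decreasing_by exact Nat.div_lt_self (by omega) (by norm_num)

-- "A returns False before reaching the first negative combination element": among the
-- digit products of c*10+r (c the nonnegative prefix of `combinations`, r the leading digit
-- of `number`) there is a repeat or a key already in `map`.
def pvPreEarlyFalse (number : Int) (map : List (Int × Int)) (combinations : List Int) : Bool :=
  let ps := (combinations.takeWhile (fun c => decide (0 ≤ c))).map
      (fun c => pvPreDigitProd c.toNat * ((pvPreMsd number.toNat : Nat) : Int))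
  !decide ps.Nodup || ps.any (fun p => (PySem.Dict.ofList map).contains p)

-- Pre_ excludes EXACTLY the inputs on which Python A never returns (it diverges, raising
-- nothing): negative `number` (the `number//10` recursion never reaches 0), and positive
-- `number` whose first processing level reaches a negative `combinations` element (the
-- digit-product `while` loop never terminates on a negative value) before any duplicate
-- digit product would have made it return False (`pvPreEarlyFalse`).  On every input on
-- which A returns, Pre_ holds.
def Pre_is_colorful_num_helper (number : Int) (map : List (Int × Int)) (combinations : List Int) : Prop :=
  0 ≤ number ∧ ((∀ c ∈ combinations, 0 ≤ c) ∨ number = 0 ∨ pvPreEarlyFalse number map combinations = true)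
instance (number : Int) (map : List (Int × Int)) (combinations : List Int) : Decidable (Pre_is_colorful_num_helper number map combinations) := by unfold Pre_is_colorful_num_helper; infer_instance

def pvWitness_is_colorful_num_helper : Int × (List (Int × Int)) × List Int := (23, [], [])

def Spec_is_colorful_num_helper (number : Int) (map : List (Int × Int)) (combinations : List Int) (out : Bool) : Prop := out = is_colorful_num_helper_alt number map combinations
instance (number : Int) (map : List (Int × Int)) (combinations : List Int) (out : Bool) : Decidable (Spec_is_colorful_num_helper number map combinations out) := by unfold Spec_is_colorful_num_helper; infer_instance

-- ===== CLAIM (what is proved, stated in full; the proofs are below) =====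
def Claim_equal_is_colorful_num_helper : Prop := ∀ (number : Int) (map : List (Int × Int)) (combinations : List Int), Dom_is_colorful_num_helper number map combinations → Pre_is_colorful_num_helper number map combinations → Spec_is_colorful_num_helper number map combinations (is_colorful_num_helper number map combinations)

-- ===== LEMMAS AND PROOFS =====

lemma pvDigitProdA_zero : pvDigitProdA 0 1 = 1 := by
  rw [pvDigitProdA]
  norm_num

-- accumulator form of the A-side digit-product loop
lemma pvDigitProdA_acc : ∀ (N : Nat) (v a : Int), v.toNat ≤ N →
    pvDigitProdA v a = a * pvDigitProdA v 1 := by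
  intro N
  induction N with
  | zero =>
    intro v a hv
    have e : ∀ b : Int, pvDigitProdA v b = b := by
      intro b; rw [pvDigitProdA, if_neg (by omega : ¬ 0 < v)]
    rw [e, e]; ring
  | succ N ih =>
    intro v a hv
    by_cases h : 0 < v
    · have e : ∀ b : Int, pvDigitProdA v b =
          pvDigitProdA (v / 10) (b * PySem.Int.mod v 10) := by
        intro b
        conv_lhs => rw [pvDigitProdA]
        rw [if_pos h, PySem.Int.floordiv_eq_ediv_of_pos (by omega : (0:Int) < 10)]
      have hle : (v / 10).toNat ≤ N := by omega
      rw [e, e, ih (v / 10) _ hle, ih (v / 10) _ hle]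
      rw [ih (v / 10) (1 * PySem.Int.mod v 10) hle]
      ring
    · have e : ∀ b : Int, pvDigitProdA v b = b := by
        intro b; rw [pvDigitProdA, if_neg h]
      rw [e, e]; ring

-- B's helper computes the same digit product as A's inner loop
lemma pvDigitProdB_eq : ∀ (N : Nat) (v a : Int), v.toNat ≤ N →
    pvDigitProdB v a = pvDigitProdA v a := by
  intro N
  induction N with
  | zero =>
    intro v a hv
    rw [pvDigitProdB, pvDigitProdA]
    simp only [if_neg (by omega : ¬ 0 < v)]
  | succ N ih =>
    intro v a hv
    rw [pvDigitProdB, pvDigitProdA]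
    by_cases h : 0 < v
    · simp only [if_pos h]
      refine ih _ _ ?_
      rw [PySem.Int.floordiv_eq_ediv_of_pos (by omega : (0:Int) < 10)]
      omega
    · simp only [if_neg h]

-- the incremental-product step: product of digits of v*10+r
lemma pvDigitProd_step (v r : Int) (hv : 0 ≤ v) (hr0 : 0 ≤ r) (hr : r < 10) :
    pvDigitProdA (v * 10 + r) 1 = if v * 10 + r = 0 then 1 else pvDigitProdA v 1 * r := by
  by_cases h0 : v * 10 + r = 0
  · rw [if_pos h0, h0, pvDigitProdA]
    simp
  · rw [if_neg h0]
    have hpos : 0 < v * 10 + r := by omega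
    conv_lhs => rw [pvDigitProdA]
    rw [if_pos hpos]
    rw [PySem.Int.floordiv_eq_ediv_of_pos (by omega : (0:Int) < 10),
        PySem.Int.mod_eq_emod_of_pos (by omega : (0:Int) < 10)]
    have hdiv : (v * 10 + r) / 10 = v := by omega
    have hmod : (v * 10 + r) % 10 = r := by omega
    rw [hdiv, hmod, pvDigitProdA_acc v.toNat v (1 * r) le_rfl]
    ring

lemma map_fst_seed (l : List Int) :
    (l.map (fun v => (v, pvDigitProdA v 1))).map Prod.fst = l := by
  induction l with
  | nil => rfl
  | cons h t ih => simp [ih]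

-- one level: A's loop and B's loop agree, given the pair invariant (snd = digit product of fst)
lemma level_eq (r : Int) (hr0 : 0 ≤ r) (hr : r < 10) :
    ∀ (ps : List (Int × Int)) (m : PySem.Dict Int Int) (acc : List (Int × Int)),
    (∀ x ∈ ps, 0 ≤ x.1 ∧ x.2 = pvDigitProdA x.1 1) →
    (∀ x ∈ acc, 0 ≤ x.1 ∧ x.2 = pvDigitProdA x.1 1) →
    match pvLevelB r ps m acc with
    | none => (pvLevelA r (ps.map Prod.fst) m (acc.map Prod.fst)).1 = false
    | some (m', ps') =>
        pvLevelA r (ps.map Prod.fst) m (acc.map Prod.fst) = (true, m', ps'.map Prod.fst) ∧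
        ∀ x ∈ ps', 0 ≤ x.1 ∧ x.2 = pvDigitProdA x.1 1 := by
  intro ps
  induction ps with
  | nil =>
    intro m acc _ hacc
    simp only [pvLevelB, List.map_nil]
    exact ⟨by simp [pvLevelA], hacc⟩
  | cons hd tl ih =>
    intro m acc hps hacc
    obtain ⟨v, p⟩ := hd
    have hv : 0 ≤ v := (hps (v, p) (by simp)).1
    have hp : p = pvDigitProdA v 1 := (hps (v, p) (by simp)).2
    have hprod : pvDigitProdA (v * 10 + r) 1 = (if v * 10 + r = 0 then 1 else p * r) := by
      rw [pvDigitProd_step v r hv hr0 hr, hp]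
    simp only [pvLevelB, pvLevelA, List.map_cons]
    rw [hprod]
    by_cases hc : m.contains (if v * 10 + r = 0 then 1 else p * r)
    · simp only [if_pos hc]
    · simp only [if_neg hc]
      have hnew : ∀ x ∈ acc ++ [(v * 10 + r, if v * 10 + r = 0 then 1 else p * r)],
          0 ≤ x.1 ∧ x.2 = pvDigitProdA x.1 1 := by
        intro x hx
        rcases List.mem_append.1 hx with h | h
        · exact hacc x h
        · simp only [List.mem_singleton] at h
          subst h
          refine ⟨by omega, ?_⟩
          rw [pvDigitProd_step v r hv hr0 hr, hp]
      have := ih (m.insert (if v * 10 + r = 0 then 1 else p * r) 1)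
        (acc ++ [(v * 10 + r, if v * 10 + r = 0 then 1 else p * r)])
        (fun x hx => hps x (List.mem_cons_of_mem _ hx)) hnew
      simpa [List.map_append] using this

-- pvGoB distributes over list append
lemma pvGoB_append : ∀ (l1 l2 : List Int) (m : PySem.Dict Int Int) (ps : List (Int × Int)),
    pvGoB (l1 ++ l2) m ps =
      match pvGoB l1 m ps with
      | none => none
      | some (m', ps') => pvGoB l2 m' ps' := by
  intro l1
  induction l1 with
  | nil => intro l2 m ps; simp [pvGoB]
  | cons r tl ih =>
    intro l2 m ps
    simp only [List.cons_append, pvGoB]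
    cases pvLevelB r ps m [(0, 1)] with
    | none => rfl
    | some s => exact ih l2 s.1 s.2

-- the digit list of n > 0 splits as digits(n // 10) ++ [n % 10]
lemma lowDigits_split (n : Int) (hn : 0 < n) :
    (pvLowDigits n).reverse =
      (pvLowDigits (PySem.Int.floordiv n 10)).reverse ++ [PySem.Int.mod n 10] := by
  rw [pvLowDigits, if_pos hn, List.reverse_cons]

lemma goA_zero (m : PySem.Dict Int Int) (c : List Int) : pvGoA 0 m c = (true, m, c ++ [0]) := by
  rw [pvGoA]
  simp

-- base case of the main invariant (n = 0)
lemma go_eq_zero (m : PySem.Dict Int Int) (c : List Int) (hc : ∀ v ∈ c, 0 ≤ v) :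
    match pvGoB (pvLowDigits 0).reverse m
        ((c ++ [0]).map (fun v => (v, pvDigitProdA v 1))) with
    | none => (pvGoA 0 m c).1 = false
    | some (m', ps') =>
        pvGoA 0 m c = (true, m', ps'.map Prod.fst) ∧
        ∀ x ∈ ps', 0 ≤ x.1 ∧ x.2 = pvDigitProdA x.1 1 := by
  rw [pvLowDigits]
  simp only [if_neg (by omega : ¬ (0:Int) < 0), List.reverse_nil, pvGoB]
  refine ⟨by rw [goA_zero, map_fst_seed], ?_⟩
  intro x hx
  simp only [List.mem_map] at hx
  obtain ⟨v, hv, rfl⟩ := hx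
  refine ⟨?_, rfl⟩
  rcases List.mem_append.1 hv with h | h
  · exact hc v h
  · simp only [List.mem_singleton] at h; omega

-- main invariant: A's recursion equals B's digit fold over the same seeds
lemma go_eq : ∀ (N : Nat) (n : Int), n.toNat ≤ N → 0 ≤ n →
    ∀ (m : PySem.Dict Int Int) (c : List Int), (∀ v ∈ c, 0 ≤ v) →
    match pvGoB (pvLowDigits n).reverse m
        ((c ++ [0]).map (fun v => (v, pvDigitProdA v 1))) with
    | none => (pvGoA n m c).1 = false
    | some (m', ps') =>
        pvGoA n m c = (true, m', ps'.map Prod.fst) ∧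
        ∀ x ∈ ps', 0 ≤ x.1 ∧ x.2 = pvDigitProdA x.1 1 := by
  intro N
  induction N with
  | zero =>
    intro n hn h0 m c hc
    have hn0 : n = 0 := by omega
    subst hn0
    exact go_eq_zero m c hc
  | succ N ih =>
    intro n hn h0 m c hc
    by_cases hz : n = 0
    · subst hz
      exact go_eq_zero m c hc
    · have hpos : 0 < n := by omega
      have hqN : (PySem.Int.floordiv n 10).toNat ≤ N := by
        rw [PySem.Int.floordiv_eq_ediv_of_pos (by omega : (0:Int) < 10)]
        omega
      have hq0 : 0 ≤ PySem.Int.floordiv n 10 := by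
        rw [PySem.Int.floordiv_eq_ediv_of_pos (by omega : (0:Int) < 10)]
        omega
      have hr0 : 0 ≤ PySem.Int.mod n 10 := PySem.Int.mod_nonneg n (by omega)
      have hrlt : PySem.Int.mod n 10 < 10 := PySem.Int.mod_lt n (by omega)
      have hA : pvGoA n m c =
          match pvGoA (PySem.Int.floordiv n 10) m c with
          | (false, m1, c1) => (false, m1, c1)
          | (true, m1, c1) => pvLevelA (PySem.Int.mod n 10) c1 m1 [0] := by
        rw [pvGoA, if_neg hz, if_neg (by omega : ¬ n < 0)]
      have hih := ih (PySem.Int.floordiv n 10) hqN hq0 m c hc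
      rw [lowDigits_split n hpos, pvGoB_append]
      cases hB : pvGoB (pvLowDigits (PySem.Int.floordiv n 10)).reverse m
          ((c ++ [0]).map (fun v => (v, pvDigitProdA v 1))) with
      | none =>
        rw [hB] at hih
        simp only at hih ⊢
        rcases hgo : pvGoA (PySem.Int.floordiv n 10) m c with ⟨b, m1, c1⟩
        rw [hgo] at hih
        simp only at hih
        subst hih
        rw [hA, hgo]
      | some s =>
        obtain ⟨m1, ps1⟩ := s
        rw [hB] at hih
        simp only at hih ⊢
        obtain ⟨hA1, hinv⟩ := hih
        have hA2 : pvGoA n m c = pvLevelA (PySem.Int.mod n 10) (ps1.map Prod.fst) m1 [0] := by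
          rw [hA, hA1]
        have hacc : ∀ x ∈ ([(0, 1)] : List (Int × Int)), 0 ≤ x.1 ∧ x.2 = pvDigitProdA x.1 1 := by
          intro x hx
          simp only [List.mem_singleton] at hx
          subst hx
          exact ⟨by norm_num, by rw [pvDigitProdA_zero]⟩
        have hlev := level_eq (PySem.Int.mod n 10) hr0 hrlt ps1 m1 [(0, 1)] hinv hacc
        simp only [pvGoB]
        cases hL : pvLevelB (PySem.Int.mod n 10) ps1 m1 [(0, 1)] with
        | none =>
          rw [hL] at hlev
          simp only at hlev ⊢
          rw [hA2]
          simpa using hlev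
        | some t =>
          obtain ⟨m2, ps2⟩ := t
          rw [hL] at hlev
          simp only at hlev ⊢
          obtain ⟨hlev1, hinv2⟩ := hlev
          refine ⟨?_, hinv2⟩
          rw [hA2]
          simpa using hlev1

-- ===== lemmas for the early-False branch (negative element present, A still returns False) =====

-- leading digit bounds
lemma pvPreMsd_bounds : ∀ (N n : Nat), n ≤ N → 0 < n → 1 ≤ pvPreMsd n ∧ pvPreMsd n ≤ 9 := by
  intro N
  induction N with
  | zero => intro n hn h0; omega
  | succ N ih =>
    intro n hn h0
    rw [pvPreMsd]
    by_cases h : n < 10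
    · simp only [if_pos h]; omega
    · simp only [if_neg h]
      exact ih (n / 10) (by omega) (by omega)

-- A's digit-product loop agrees with the closed-form digit product on nonnegative values
lemma pvPreDigitProd_eq : ∀ (N : Nat) (c : Int), c.toNat ≤ N → 0 ≤ c →
    pvDigitProdA c 1 = pvPreDigitProd c.toNat := by
  intro N
  induction N with
  | zero =>
    intro c hc h0
    have : c = 0 := by omega
    subst this
    rw [pvDigitProdA_zero, pvPreDigitProd]
    simp
  | succ N ih =>
    intro c hc h0
    by_cases hz : c = 0
    · subst hz
      rw [pvDigitProdA_zero, pvPreDigitProd]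
      simp
    · have hpos : 0 < c := by omega
      conv_lhs => rw [pvDigitProdA]
      rw [if_pos hpos, PySem.Int.floordiv_eq_ediv_of_pos (by omega : (0:Int) < 10),
          PySem.Int.mod_eq_emod_of_pos (by omega : (0:Int) < 10),
          pvDigitProdA_acc (c / 10).toNat (c / 10) _ le_rfl,
          ih (c / 10) (by omega) (by omega)]
      conv_rhs => rw [pvPreDigitProd]
      rw [dif_neg (by omega : ¬ c.toNat = 0)]
      have h1 : (c.toNat / 10 : Nat) = (c / 10).toNat := by omega
      have h2 : ((c.toNat % 10 : Nat) : Int) = 1 * (c % 10) := by omega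
      rw [h1, h2]
      ring

-- if the mapped products of a prefix repeat or hit the dict, A's level loop returns False
lemma pvLevelA_fail (r : Int) : ∀ (xs rest : List Int) (m : PySem.Dict Int Int) (acc : List Int),
    (¬ (xs.map (fun x => pvDigitProdA (x * 10 + r) 1)).Nodup ∨
      ∃ p ∈ xs.map (fun x => pvDigitProdA (x * 10 + r) 1), m.contains p = true) →
    (pvLevelA r (xs ++ rest) m acc).1 = false := by
  intro xs
  induction xs with
  | nil =>
    intro rest m acc h
    rcases h with h | ⟨p, hp, _⟩
    · exact absurd List.nodup_nil h
    · simp at hp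
  | cons x xs ih =>
    intro rest m acc h
    simp only [List.cons_append, pvLevelA]
    by_cases hc : m.contains (pvDigitProdA (x * 10 + r) 1)
    · simp only [if_pos hc]
    · simp only [if_neg hc]
      apply ih
      rcases h with h | ⟨p, hp, hmp⟩
      · rw [List.map_cons, List.nodup_cons] at h
        push_neg at h
        by_cases hmem : pvDigitProdA (x * 10 + r) 1 ∈
            xs.map (fun x => pvDigitProdA (x * 10 + r) 1)
        · right
          refine ⟨pvDigitProdA (x * 10 + r) 1, hmem, ?_⟩
          rw [PySem.Dict.contains_insert]
          simp
        · left
          intro hnd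
          exact h hmem hnd
      · simp only [List.map_cons, List.mem_cons] at hp
        rcases hp with hp | hp
        · rw [hp] at hmp
          exact absurd hmp hc
        · right
          refine ⟨p, hp, ?_⟩
          rw [PySem.Dict.contains_insert]
          rw [hmp]
          simp
  
-- same for B's level loop
lemma pvLevelB_fail (r : Int) : ∀ (xs rest : List (Int × Int)) (m : PySem.Dict Int Int)
    (acc : List (Int × Int)),
    (¬ (xs.map (fun x => if x.1 * 10 + r = 0 then 1 else x.2 * r)).Nodup ∨
      ∃ p ∈ xs.map (fun x => if x.1 * 10 + r = 0 then 1 else x.2 * r), m.contains p = true) →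
    pvLevelB r (xs ++ rest) m acc = none := by
  intro xs
  induction xs with
  | nil =>
    intro rest m acc h
    rcases h with h | ⟨p, hp, _⟩
    · exact absurd List.nodup_nil h
    · simp at hp
  | cons x xs ih =>
    intro rest m acc h
    obtain ⟨v, p0⟩ := x
    simp only [List.cons_append, pvLevelB]
    by_cases hc : m.contains (if v * 10 + r = 0 then 1 else p0 * r)
    · simp only [if_pos hc]
    · simp only [if_neg hc]
      apply ih
      rcases h with h | ⟨p, hp, hmp⟩
      · rw [List.map_cons, List.nodup_cons] at h
        push_neg at h
        by_cases hmem : (if v * 10 + r = 0 then 1 else p0 * r) ∈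
            xs.map (fun x => if x.1 * 10 + r = 0 then 1 else x.2 * r)
        · right
          refine ⟨_, hmem, ?_⟩
          rw [PySem.Dict.contains_insert]
          simp
        · left
          intro hnd
          exact h hmem hnd
      · simp only [List.map_cons, List.mem_cons] at hp
        rcases hp with hp | hp
        · rw [hp] at hmp
          exact absurd hmp hc
        · right
          refine ⟨p, hp, ?_⟩
          rw [PySem.Dict.contains_insert]
          rw [hmp]
          simp

-- a failing first level makes A's whole recursion return False
lemma pvGoA_fail : ∀ (N : Nat) (n : Int), n.toNat ≤ N → 0 < n →
    ∀ (m : PySem.Dict Int Int) (c : List Int),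
    (pvLevelA ((pvPreMsd n.toNat : Nat) : Int) (c ++ [0]) m [0]).1 = false →
    (pvGoA n m c).1 = false := by
  intro N
  induction N with
  | zero => intro n hn h0; omega
  | succ N ih =>
    intro n hn h0 m c hfail
    rw [pvGoA, if_neg (by omega : ¬ n = 0), if_neg (by omega : ¬ n < 0)]
    by_cases hq : PySem.Int.floordiv n 10 = 0
    · rw [hq, goA_zero]
      have hlt : n < 10 := by
        rw [PySem.Int.floordiv_eq_ediv_of_pos (by omega : (0:Int) < 10)] at hq
        omega
      have hmod : PySem.Int.mod n 10 = n := by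
        rw [PySem.Int.mod_eq_emod_of_pos (by omega : (0:Int) < 10)]
        omega
      have hmsd : pvPreMsd n.toNat = n.toNat := by
        rw [pvPreMsd, if_pos (by omega : n.toNat < 10)]
      rw [hmsd] at hfail
      have hcast : ((n.toNat : Nat) : Int) = n := by omega
      rw [hcast] at hfail
      simp only [hmod]
      exact hfail
    · have hq0 : 0 < PySem.Int.floordiv n 10 := by
        rw [PySem.Int.floordiv_eq_ediv_of_pos (by omega : (0:Int) < 10)] at hq ⊢
        omega
      have hqN : (PySem.Int.floordiv n 10).toNat ≤ N := by
        rw [PySem.Int.floordiv_eq_ediv_of_pos (by omega : (0:Int) < 10)]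
        omega
      have hmsd : pvPreMsd (PySem.Int.floordiv n 10).toNat = pvPreMsd n.toNat := by
        have hge : ¬ n.toNat < 10 := by
          rw [PySem.Int.floordiv_eq_ediv_of_pos (by omega : (0:Int) < 10)] at hq0
          omega
        have hcast : (PySem.Int.floordiv n 10).toNat = n.toNat / 10 := by
          rw [PySem.Int.floordiv_eq_ediv_of_pos (by omega : (0:Int) < 10)]
          omega
        rw [hcast]
        conv_rhs => rw [pvPreMsd, if_neg hge]
      have := ih (PySem.Int.floordiv n 10) hqN hq0 m c (by rw [hmsd]; exact hfail)
      rcases hgo : pvGoA (PySem.Int.floordiv n 10) m c with ⟨b, m1, c1⟩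
      rw [hgo] at this
      simp only at this
      subst this
      simp

-- the reversed digit list of n > 0 starts with the leading digit
lemma pvLowDigits_head : ∀ (N : Nat) (n : Int), n.toNat ≤ N → 0 < n →
    ∃ t, (pvLowDigits n).reverse = ((pvPreMsd n.toNat : Nat) : Int) :: t := by
  intro N
  induction N with
  | zero => intro n hn h0; omega
  | succ N ih =>
    intro n hn h0
    by_cases hq : PySem.Int.floordiv n 10 = 0
    · have hlt : n < 10 := by
        rw [PySem.Int.floordiv_eq_ediv_of_pos (by omega : (0:Int) < 10)] at hq
        omega
      refine ⟨[], ?_⟩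
      rw [pvLowDigits, if_pos h0, hq, pvLowDigits, if_neg (by omega : ¬ (0:Int) < 0)]
      have hmod : PySem.Int.mod n 10 = n := by
        rw [PySem.Int.mod_eq_emod_of_pos (by omega : (0:Int) < 10)]
        omega
      have hmsd : pvPreMsd n.toNat = n.toNat := by
        rw [pvPreMsd, if_pos (by omega : n.toNat < 10)]
      rw [hmod, hmsd]
      simp
      omega
    · have hq0 : 0 < PySem.Int.floordiv n 10 := by
        rw [PySem.Int.floordiv_eq_ediv_of_pos (by omega : (0:Int) < 10)] at hq ⊢
        omega
      have hqN : (PySem.Int.floordiv n 10).toNat ≤ N := by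
        rw [PySem.Int.floordiv_eq_ediv_of_pos (by omega : (0:Int) < 10)]
        omega
      obtain ⟨t, ht⟩ := ih (PySem.Int.floordiv n 10) hqN hq0
      have hmsd : pvPreMsd (PySem.Int.floordiv n 10).toNat = pvPreMsd n.toNat := by
        have hge : ¬ n.toNat < 10 := by
          rw [PySem.Int.floordiv_eq_ediv_of_pos (by omega : (0:Int) < 10)] at hq0
          omega
        have hcast : (PySem.Int.floordiv n 10).toNat = n.toNat / 10 := by
          rw [PySem.Int.floordiv_eq_ediv_of_pos (by omega : (0:Int) < 10)]
          omega
        rw [hcast]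
        conv_rhs => rw [pvPreMsd, if_neg hge]
      refine ⟨t ++ [PySem.Int.mod n 10], ?_⟩
      rw [lowDigits_split n h0, ht, hmsd]
      simp

-- ===== VERDICT (by name: the statement is the Claim_ definition above) =====
theorem is_colorful_num_helper_spec : Claim_equal_is_colorful_num_helper := by
  intro number map combinations hdom hpre
  unfold Spec_is_colorful_num_helper
  by_cases hz : number = 0
  · subst hz
    rw [is_colorful_num_helper, is_colorful_num_helper_alt, goA_zero]
    rfl
  · obtain ⟨h0, hor⟩ := hpre
    have hnpos : 0 < number := by omega
    by_cases hall : ∀ v ∈ combinations, 0 ≤ v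
    · -- all combination elements nonnegative: the full invariant proof
      have hseed : (combinations.map (fun c => (c, pvDigitProdB c 1))) ++ [(0, 1)] =
          (combinations ++ [0]).map (fun v => (v, pvDigitProdA v 1)) := by
        rw [List.map_append]
        congr 1
        · apply List.map_congr_left
          intro v _
          rw [pvDigitProdB_eq v.toNat v 1 le_rfl]
        · simp only [List.map_cons, List.map_nil, pvDigitProdA_zero]
      rw [is_colorful_num_helper, is_colorful_num_helper_alt, if_neg hz, hseed]
      have h := go_eq number.toNat number le_rfl h0 (PySem.Dict.ofList map) combinations hall
      cases hB : pvGoB (pvLowDigits number).reverse (PySem.Dict.ofList map)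
          ((combinations ++ [0]).map (fun v => (v, pvDigitProdA v 1))) with
      | none =>
        rw [hB] at h
        simp only at h ⊢
        exact h
      | some s =>
        rw [hB] at h
        simp only at h ⊢
        rw [h.1]
    · -- a negative element exists: Pre_ guarantees the early-False condition, both return false
      have hEF : pvPreEarlyFalse number map combinations = true := by
        rcases hor with h | h | h
        · exact absurd h hall
        · exact absurd h hz
        · exact h
      set r : Int := ((pvPreMsd number.toNat : Nat) : Int) with hrdef
      have hrb := pvPreMsd_bounds number.toNat number.toNat le_rfl (by omega)
      have hr1 : 1 ≤ r := by simp [hrdef]; omega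
      have hr9 : r ≤ 9 := by simp [hrdef]; omega
      set pre : List Int := combinations.takeWhile (fun c => decide (0 ≤ c)) with hpredef
      have hprenn : ∀ c ∈ pre, 0 ≤ c := by
        intro c hc
        have := List.mem_takeWhile_imp hc
        simpa using this
      -- the products computed by Pre_ coincide with both loops' products on the prefix
      have hprodA : ∀ c ∈ pre, pvDigitProdA (c * 10 + r) 1 = pvPreDigitProd c.toNat * r := by
        intro c hc
        have hcnn := hprenn c hc
        rw [pvDigitProd_step c r hcnn (by omega) (by omega),
            if_neg (by omega : ¬ c * 10 + r = 0),
            pvPreDigitProd_eq c.toNat c le_rfl hcnn]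
      unfold pvPreEarlyFalse at hEF
      simp only [← hpredef, ← hrdef] at hEF
      rw [Bool.or_eq_true, Bool.not_eq_true', decide_eq_false_iff_not, List.any_eq_true] at hEF
      have hEF' : ¬ (pre.map (fun x => pvDigitProdA (x * 10 + r) 1)).Nodup ∨
          ∃ p ∈ pre.map (fun x => pvDigitProdA (x * 10 + r) 1),
            (PySem.Dict.ofList map).contains p = true := by
        have hmapeq : pre.map (fun x => pvDigitProdA (x * 10 + r) 1) =
            pre.map (fun c => pvPreDigitProd c.toNat * r) :=
          List.map_congr_left hprodA
        rw [hmapeq]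
        exact hEF
      have hsplit : combinations = pre ++ combinations.dropWhile (fun c => decide (0 ≤ c)) := by
        rw [hpredef, List.takeWhile_append_dropWhile]
      -- A side
      have hAfalse : (pvGoA number (PySem.Dict.ofList map) combinations).1 = false := by
        apply pvGoA_fail number.toNat number le_rfl hnpos
        have : combinations ++ [0] =
            pre ++ (combinations.dropWhile (fun c => decide (0 ≤ c)) ++ [0]) := by
          conv_lhs => rw [hsplit]
          rw [List.append_assoc]
        rw [this, ← hrdef]
        exact pvLevelA_fail r pre _ _ _ hEF'
      -- B side
      have hBfalse : pvGoB (pvLowDigits number).reverse (PySem.Dict.ofList map)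
          ((combinations.map (fun c => (c, pvDigitProdB c 1))) ++ [(0, 1)]) = none := by
        obtain ⟨t, ht⟩ := pvLowDigits_head number.toNat number le_rfl hnpos
        rw [ht, ← hrdef]
        simp only [pvGoB]
        have hseedsplit : (combinations.map (fun c => (c, pvDigitProdB c 1))) ++ [(0, 1)] =
            pre.map (fun c => (c, pvDigitProdB c 1)) ++
              ((combinations.dropWhile (fun c => decide (0 ≤ c))).map
                (fun c => (c, pvDigitProdB c 1)) ++ [(0, 1)]) := by
          conv_lhs => rw [hsplit]
          rw [List.map_append, List.append_assoc]
        rw [hseedsplit]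
        have hfailB := pvLevelB_fail r (pre.map (fun c => (c, pvDigitProdB c 1)))
          ((combinations.dropWhile (fun c => decide (0 ≤ c))).map
            (fun c => (c, pvDigitProdB c 1)) ++ [(0, 1)])
          (PySem.Dict.ofList map) [(0, 1)] ?_
        · rw [hfailB]
        · have hmapeq : (pre.map (fun c => (c, pvDigitProdB c 1))).map
              (fun x => if x.1 * 10 + r = 0 then 1 else x.2 * r) =
              pre.map (fun x => pvDigitProdA (x * 10 + r) 1) := by
            rw [List.map_map]
            apply List.map_congr_left
            intro c hc
            have hcnn := hprenn c hc
            simp only [Function.comp]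
            rw [if_neg (by omega : ¬ c * 10 + r = 0),
                pvDigitProdB_eq c.toNat c 1 le_rfl,
                pvPreDigitProd_eq c.toNat c le_rfl hcnn,
                hprodA c hc]
          rw [hmapeq]
          exact hEF'
      rw [is_colorful_num_helper, is_colorful_num_helper_alt, if_neg hz, hBfalse, hAfalse]
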